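-- pv_equiv track=rewrite | github.com/deepjyotisaha/eag10 | e10/memory/session_log.py | get_tool_success_rate
-- ===== SOURCE A (Python) =====
-- from typing import Dict, List, Optional, Tuple
--
-- def get_tool_success_rate(tool_usage: List[Dict]) -> Dict[str, Tuple[int, int]]:
--     """
--     Calculate success rate for each tool used in the session.
--
--     Args:
--         tool_usage: List of tool usage dictionaries from extract_session_state
--
--     Returns:
--         Dict mapping tool names to (success_count, total_attempts)
--     """
--     tool_stats = {}
--
--     for usage in tool_usage:
--         tool_name = usage["tool_name"]
--         if tool_name not in tool_stats:
--             tool_stats[tool_name] = [0, 0]  # [successes, total]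
--
--         tool_stats[tool_name][1] += 1  # increment total
--         if usage["status"] == "success":
--             tool_stats[tool_name][0] += 1  # increment successes
--
--     return tool_stats
-- ===== SOURCE B (Python) =====
-- from collections import Counter
--
-- def get_tool_success_rate(tool_usage):
--     totals = Counter(u["tool_name"] for u in tool_usage)
--     successes = Counter(u["tool_name"] for u in tool_usage if u["status"] == "success")
--     return {name: [successes.get(name, 0), total] for name, total in totals.items()}
-- ===== Notes on version B (the rewrite author's own statement) =====
-- stated objective: alternative
-- what changed: Replaces A's single loop that conditionally initialises and mutates per-tool [successes, total] list cells in place with two declarative Counter aggregations (totals and successes) assembled into the result dict in one comprehension over totals' first-appearance order.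
import Mathlib
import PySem

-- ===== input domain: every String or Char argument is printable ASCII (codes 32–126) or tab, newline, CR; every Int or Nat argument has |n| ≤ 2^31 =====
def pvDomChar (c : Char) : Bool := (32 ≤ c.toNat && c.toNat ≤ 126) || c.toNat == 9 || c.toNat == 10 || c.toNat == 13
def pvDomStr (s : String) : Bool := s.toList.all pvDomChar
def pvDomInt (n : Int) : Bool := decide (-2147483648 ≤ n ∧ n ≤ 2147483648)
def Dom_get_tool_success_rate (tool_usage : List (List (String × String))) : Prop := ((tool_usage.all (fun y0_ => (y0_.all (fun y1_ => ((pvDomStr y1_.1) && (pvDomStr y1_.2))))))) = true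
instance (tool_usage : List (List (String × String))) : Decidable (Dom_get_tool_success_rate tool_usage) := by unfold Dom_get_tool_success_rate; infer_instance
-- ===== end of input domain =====

-- B replaces A's single mutating loop by two Counter aggregations assembled in one comprehension (alternative decomposition, same O(n) cost).

-- ===== PORT A =====
-- A: one loop; per usage, initialise tool_stats[name] = [0,0] if fresh, then bump total and,
-- on "success", bump successes, by in-place list-index assignment (ported via pyGetD/pySetD).
-- usage["tool_name"] / usage["status"] are first-match dict lookups; Pre_ guarantees the keys
-- exist, so the `.getD ""` default is never consulted inside Pre_.
def get_tool_success_rate (tool_usage : List (List (String × String))) : List (String × List Int) :=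
  (tool_usage.foldl (fun tool_stats usage =>
      let tool_name := (PySem.Dict.mk usage).getD "tool_name" ""
      let tool_stats := if tool_stats.contains tool_name then tool_stats
                        else tool_stats.insert tool_name [0, 0]
      -- tool_stats[tool_name][1] += 1  (the key is present, so the modify default is never used)
      let tool_stats := tool_stats.modify tool_name [0, 0]
          (fun l => PySem.List.pySetD l 1 (PySem.List.pyGetD l 1 0 + 1))
      if (PySem.Dict.mk usage).getD "status" "" == "success" then
        tool_stats.modify tool_name [0, 0]
          (fun l => PySem.List.pySetD l 0 (PySem.List.pyGetD l 0 0 + 1))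
      else tool_stats)
    PySem.Dict.empty).items

-- ===== PORT B =====
-- B: totals = Counter(names), successes = Counter(names of successful usages),
-- result assembled by one map over totals.items.
def get_tool_success_rate_alt (tool_usage : List (List (String × String))) : List (String × List Int) :=
  let totals := PySem.Dict.counter (tool_usage.map (fun u => (PySem.Dict.mk u).getD "tool_name" ""))
  let successes := PySem.Dict.counter
    ((tool_usage.filter (fun u => (PySem.Dict.mk u).getD "status" "" == "success")).map
      (fun u => (PySem.Dict.mk u).getD "tool_name" ""))
  totals.items.map (fun p => (p.1, [successes.getD p.1 0, p.2]))

-- ===== PRECONDITION & SPEC =====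
-- Pre_: every usage dict has the keys "tool_name" and "status"; otherwise Python A raises KeyError.
def Pre_get_tool_success_rate (tool_usage : List (List (String × String))) : Prop :=
  ∀ u ∈ tool_usage, (PySem.Dict.mk u).contains "tool_name" = true ∧ (PySem.Dict.mk u).contains "status" = true
instance (tool_usage : List (List (String × String))) : Decidable (Pre_get_tool_success_rate tool_usage) := by
  unfold Pre_get_tool_success_rate; infer_instance

def pvWitness_get_tool_success_rate : (List (List (String × String))) :=
  [[("tool_name", "search"), ("status", "success")],
   [("tool_name", "search"), ("status", "error")],
   [("tool_name", "fetch"), ("status", "success")]]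

def Spec_get_tool_success_rate (tool_usage : List (List (String × String))) (out : List (String × List Int)) : Prop := out = get_tool_success_rate_alt tool_usage
instance (tool_usage : List (List (String × String))) (out : List (String × List Int)) : Decidable (Spec_get_tool_success_rate tool_usage out) := by unfold Spec_get_tool_success_rate; infer_instance

-- ===== CLAIM (what is proved, stated in full; the proofs are below) =====
def Claim_equal_get_tool_success_rate : Prop := ∀ (tool_usage : List (List (String × String))), Dom_get_tool_success_rate tool_usage → Pre_get_tool_success_rate tool_usage → Spec_get_tool_success_rate tool_usage (get_tool_success_rate tool_usage)

-- ===== LEMMAS AND PROOFS =====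

def pvName (u : List (String × String)) : String := (PySem.Dict.mk u).getD "tool_name" ""
def pvSucc (u : List (String × String)) : Bool := (PySem.Dict.mk u).getD "status" "" == "success"

def pvSpec (l : List (List (String × String))) : List (String × List Int) :=
  (PySem.Set.ofList (l.map pvName)).map (fun n =>
    (n, [(((l.filter pvSucc).map pvName).count n : Int), ((l.map pvName).count n : Int)]))

theorem pvContains_map (s : List String) (g : String → List Int) (n : String) :
    (PySem.Dict.mk (s.map (fun m => (m, g m)))).contains n = s.contains n := by
  simp [PySem.Dict.contains, List.any_map, Function.comp_def, List.any_beq']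

theorem pvGet?_map (s : List String) (g : String → List Int) (n : String) (hnd : s.Nodup)
    (hn : n ∈ s) :
    (PySem.Dict.mk (s.map (fun m => (m, g m)))).get? n = some (g n) := by
  apply PySem.Dict.get?_of_mem_items
  · exact List.mem_map_of_mem hn
  · simpa [PySem.Dict.keys, List.map_map, Function.comp_def] using hnd

theorem pvInsert_map (s : List String) (g : String → List Int) (n : String) (hn : n ∈ s)
    (v : List Int) :
    (PySem.Dict.mk (s.map (fun m => (m, g m)))).insert n v
      = PySem.Dict.mk (s.map (fun m => (m, if m = n then v else g m))) := by
  have hc : (PySem.Dict.mk (s.map (fun m => (m, g m)))).contains n = true := by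
    simp [PySem.Dict.contains, List.any_map, Function.comp_def, List.any_beq', hn]
  apply PySem.Dict.ext
  rw [PySem.Dict.items_insert_of_contains _ _ hc]
  simp only [List.map_map]
  apply List.map_congr_left; intro m _
  by_cases h : m = n <;> simp [h]

theorem pvModify_map (s : List String) (g : String → List Int) (n : String) (hnd : s.Nodup)
    (hn : n ∈ s) (f : List Int → List Int) :
    (PySem.Dict.mk (s.map (fun m => (m, g m)))).modify n [0, 0] f
      = PySem.Dict.mk (s.map (fun m => (m, if m = n then f (g n) else g m))) := by
  show (PySem.Dict.mk (s.map (fun m => (m, g m)))).insert n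
      (f ((PySem.Dict.mk (s.map (fun m => (m, g m)))).getD n [0, 0])) = _
  rw [PySem.Dict.getD_eq_get?_getD, pvGet?_map s g n hnd hn, Option.getD_some,
      pvInsert_map s g n hn]

theorem pvE1 (a b : Int) :
    PySem.List.pySetD [a, b] 1 (PySem.List.pyGetD [a, b] 1 0 + 1) = [a, b + 1] := by
  simp [pysem]

theorem pvE2 (a b : Int) :
    PySem.List.pySetD [a, b] 0 (PySem.List.pyGetD [a, b] 0 0 + 1) = [a + 1, b] := by
  simp [pysem]

theorem pvStep (l : List (List (String × String))) (u : List (String × String)) :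
    (let d := PySem.Dict.mk (pvSpec l)
     let n := pvName u
     let d := if d.contains n then d else d.insert n [0, 0]
     let d := d.modify n [0, 0] (fun v => PySem.List.pySetD v 1 (PySem.List.pyGetD v 1 0 + 1))
     if pvSucc u then
       d.modify n [0, 0] (fun v => PySem.List.pySetD v 0 (PySem.List.pyGetD v 0 0 + 1))
     else d)
    = PySem.Dict.mk (pvSpec (l ++ [u])) := by
  simp only []
  simp only [pvSpec]
  have hnd : (PySem.Set.ofList (l.map pvName)).Nodup := PySem.Set.nodup_ofList _
  by_cases hmem : pvName u ∈ PySem.Set.ofList (l.map pvName)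
  · have hc : (PySem.Dict.mk ((PySem.Set.ofList (l.map pvName)).map (fun n =>
        (n, [(((l.filter pvSucc).map pvName).count n : Int), ((l.map pvName).count n : Int)])))).contains (pvName u) = true := by
      rw [pvContains_map]
      simpa [List.contains_iff_mem] using hmem
    rw [if_pos hc, pvModify_map _ _ _ hnd hmem, pvModify_map _ _ _ hnd hmem]
    by_cases hs : pvSucc u <;>
    · simp only [hs, if_true, Bool.false_eq_true, if_false]
      apply PySem.Dict.ext
      simp only [List.map_append, List.filter_append, List.filter_cons, List.filter_nil, hs,
        if_true, Bool.false_eq_true, if_false, List.map_cons, List.map_nil,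
        PySem.Set.ofList_append_singleton, PySem.Set.add_of_mem hmem]
      apply List.map_congr_left
      intro m hm
      simp only [pvE1, pvE2]
      by_cases h : m = pvName u
      · subst h
        simp [List.count_append]
      · simp [h, List.count_append, Ne.symm h]
  · -- fresh tool name: the insert appends a (n, [0, 0]) entry, counts of n so far are 0
    have hc : (PySem.Dict.mk ((PySem.Set.ofList (l.map pvName)).map (fun n =>
        (n, [(((l.filter pvSucc).map pvName).count n : Int), ((l.map pvName).count n : Int)])))).contains (pvName u) = false := by
      rw [pvContains_map]
      simpa [List.contains_iff_mem] using hmem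
    rw [hc]
    simp only [Bool.false_eq_true, if_false]
    have hT : List.count (pvName u) (l.map pvName) = 0 := by
      exact List.count_eq_zero.mpr (by simpa [PySem.Set.mem_ofList] using hmem)
    have hS : List.count (pvName u) ((l.filter pvSucc).map pvName) = 0 := by
      apply List.count_eq_zero.mpr
      intro hin
      apply (by simpa [PySem.Set.mem_ofList] using hmem : pvName u ∉ l.map pvName)
      rcases List.mem_map.mp hin with ⟨w, hw, hwe⟩
      exact List.mem_map.mpr ⟨w, List.mem_of_mem_filter hw, hwe⟩
    -- items of the insert: append the fresh entry, i.e. map over s ++ [n]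
    have hins : (PySem.Dict.mk ((PySem.Set.ofList (l.map pvName)).map (fun n =>
        (n, [(((l.filter pvSucc).map pvName).count n : Int), ((l.map pvName).count n : Int)])))).insert (pvName u) [0, 0]
        = PySem.Dict.mk ((PySem.Set.ofList (l.map pvName) ++ [pvName u]).map (fun n =>
        (n, [(((l.filter pvSucc).map pvName).count n : Int), ((l.map pvName).count n : Int)]))) := by
      apply PySem.Dict.ext
      rw [PySem.Dict.items_insert_of_not_contains _ _ hc]
      simp [hT, hS]
    rw [hins]
    have hnd' : (PySem.Set.ofList (l.map pvName) ++ [pvName u]).Nodup := by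
      apply List.Nodup.append hnd (List.nodup_singleton _)
      intro a ha hb
      rw [List.mem_singleton] at hb
      subst hb
      exact hmem ha
    have hmem' : pvName u ∈ PySem.Set.ofList (l.map pvName) ++ [pvName u] := by simp
    rw [pvModify_map _ _ _ hnd' hmem']
    by_cases hs : pvSucc u <;>
    · simp only [hs, if_true, Bool.false_eq_true, if_false]
      try rw [pvModify_map _ _ _ hnd' hmem']
      apply PySem.Dict.ext
      simp only [List.map_append, List.filter_append, List.filter_cons, List.filter_nil, hs,
        if_true, Bool.false_eq_true, if_false, List.map_cons, List.map_nil,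
        PySem.Set.ofList_append_singleton, PySem.Set.add_of_not_mem hmem]
      congr 1
      · apply List.map_congr_left
        intro m hm
        have h : m ≠ pvName u := fun he => hmem (he ▸ hm)
        simp [h, List.count_append, Ne.symm h]
      · simp only [pvE1, pvE2]
        simp [List.count_append, hT, hS]

-- the main invariant: A's foldl state is exactly pvSpec of the prefix processed
theorem pvA_state (l : List (List (String × String))) :
    l.foldl (fun tool_stats usage =>
      let tool_name := (PySem.Dict.mk usage).getD "tool_name" ""
      let tool_stats := if tool_stats.contains tool_name then tool_stats
                        else tool_stats.insert tool_name [0, 0]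
      let tool_stats := tool_stats.modify tool_name [0, 0]
          (fun l => PySem.List.pySetD l 1 (PySem.List.pyGetD l 1 0 + 1))
      if (PySem.Dict.mk usage).getD "status" "" == "success" then
        tool_stats.modify tool_name [0, 0]
          (fun l => PySem.List.pySetD l 0 (PySem.List.pyGetD l 0 0 + 1))
      else tool_stats)
    PySem.Dict.empty = PySem.Dict.mk (pvSpec l) := by
  induction l using List.reverseRecOn with
  | nil => rfl
  | append_singleton l u ih =>
    rw [List.foldl_append, ih]
    simp only [List.foldl_cons, List.foldl_nil]
    exact pvStep l u

theorem get_tool_success_rate_eq_spec (l : List (List (String × String))) :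
    get_tool_success_rate l = pvSpec l := by
  unfold get_tool_success_rate
  rw [pvA_state]

theorem get_tool_success_rate_alt_eq_spec (l : List (List (String × String))) :
    get_tool_success_rate_alt l = pvSpec l := by
  unfold get_tool_success_rate_alt
  show (PySem.Dict.counter (l.map pvName)).items.map
      (fun p => (p.1, [(PySem.Dict.counter ((l.filter pvSucc).map pvName)).getD p.1 0, p.2]))
    = pvSpec l
  rw [PySem.Dict.items_counter, List.map_map]
  apply List.map_congr_left
  intro n _
  simp [PySem.Dict.getD_counter]

-- ===== VERDICT (by name: the statement is the Claim_ definition above) =====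
theorem get_tool_success_rate_spec : Claim_equal_get_tool_success_rate := by
  intro l _ _
  unfold Spec_get_tool_success_rate
  rw [get_tool_success_rate_eq_spec, get_tool_success_rate_alt_eq_spec]
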